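-- pv_equiv track=rewrite | github.com/ravish-oo/opoch-toe-arc-agi-aq | scripts/find_task_types.py | is_translation
-- ===== SOURCE A (Python) =====
-- def is_translation(A, B):
--     """Check if component B is a translation of component A."""
--     if len(A) != len(B):
--         return False
--
--     A = sorted(A)
--     B = sorted(B)
--
--     dr = B[0][0] - A[0][0]
--     dc = B[0][1] - A[0][1]
--
--     A_shifted = sorted([(r + dr, c + dc) for r, c in A])
--     return A_shifted == B
-- ===== SOURCE B (Python) =====
-- def is_translation(A, B):
--     """Check if component B is a translation of component A."""
--     if len(A) != len(B):
--         return False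
--
--     ra, ca = min(A)
--     rb, cb = min(B)
--
--     counts = {}
--     for r, c in A:
--         k = (r - ra, c - ca)
--         counts[k] = counts.get(k, 0) + 1
--     for r, c in B:
--         k = (r - rb, c - cb)
--         n = counts.get(k, 0)
--         if n == 0:
--             return False
--         counts[k] = n - 1
--     return True
-- ===== Notes on version B (the rewrite author's own statement) =====
-- stated objective: faster
-- what changed: Instead of sorting both lists and re-sorting a shifted copy, B normalizes each component to its lexicographic minimum and compares the normalized multisets with a hash-count dictionary in one pass.
import Mathlib
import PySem

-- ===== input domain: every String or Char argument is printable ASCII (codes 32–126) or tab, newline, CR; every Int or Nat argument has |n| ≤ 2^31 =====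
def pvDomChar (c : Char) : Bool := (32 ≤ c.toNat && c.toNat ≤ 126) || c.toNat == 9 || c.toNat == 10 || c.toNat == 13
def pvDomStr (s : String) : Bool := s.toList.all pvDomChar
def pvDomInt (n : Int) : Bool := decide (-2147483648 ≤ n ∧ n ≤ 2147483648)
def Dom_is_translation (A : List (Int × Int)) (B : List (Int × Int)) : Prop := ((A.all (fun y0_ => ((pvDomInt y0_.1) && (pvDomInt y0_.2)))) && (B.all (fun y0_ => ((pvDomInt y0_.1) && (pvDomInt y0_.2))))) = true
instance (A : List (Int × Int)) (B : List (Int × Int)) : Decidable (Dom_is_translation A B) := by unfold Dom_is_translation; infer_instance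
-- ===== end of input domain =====

-- B replaces sort-shift-sort-compare by origin-normalisation and a one-pass multiset count (objective: faster).

-- ===== PORT A =====
def is_translation (A : List (Int × Int)) (B : List (Int × Int)) : Bool :=
  if A.length ≠ B.length then false
  else
    let A1 := PySem.List.sorted2 A (fun p => p.1) (fun p => p.2)
    let B1 := PySem.List.sorted2 B (fun p => p.1) (fun p => p.2)
    match PySem.List.pyGet? B1 0, PySem.List.pyGet? A1 0 with
    | some b0, some a0 =>
      let dr := b0.1 - a0.1
      let dc := b0.2 - a0.2
      let A_shifted := PySem.List.sorted2 (A1.map (fun p => (p.1 + dr, p.2 + dc))) (fun p => p.1) (fun p => p.2)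
      decide (A_shifted = B1)
    | _, _ => false    -- IndexError (both lists empty): excluded by Pre_

-- ===== PORT B =====
-- the second loop of Source B ('for r, c in B: … return False …')
def pvChk (mb : Int × Int) (counts : PySem.Dict (Int × Int) Int) : List (Int × Int) → Bool
  | [] => true
  | p :: rest =>
    let k := (p.1 - mb.1, p.2 - mb.2)
    let n := counts.getD k 0
    if n == 0 then false
    else pvChk mb (counts.insert k (n - 1)) rest

def is_translation_alt (A : List (Int × Int)) (B : List (Int × Int)) : Bool :=
  if A.length ≠ B.length then false
  else
    match PySem.List.min2? A (fun p => p.1) (fun p => p.2) with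
    | none => false    -- ValueError (min of empty A): excluded by Pre_
    | some ma =>
      match PySem.List.min2? B (fun p => p.1) (fun p => p.2) with
      | none => false    -- ValueError (min of empty B): excluded by Pre_
      | some mb =>
        let counts := A.foldl
          (fun d p => d.insert (p.1 - ma.1, p.2 - ma.2) (d.getD (p.1 - ma.1, p.2 - ma.2) 0 + 1))
          PySem.Dict.empty
        pvChk mb counts B

-- ===== PRECONDITION & SPEC =====
-- Pre_ excludes only the input where BOTH lists are empty: there A raises IndexError (B[0]) and Source B raises ValueError (min([])).
def Pre_is_translation (A : List (Int × Int)) (B : List (Int × Int)) : Prop := ¬(A = [] ∧ B = [])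
instance (A : List (Int × Int)) (B : List (Int × Int)) : Decidable (Pre_is_translation A B) := by unfold Pre_is_translation; infer_instance
def pvWitness_is_translation : (List (Int × Int)) × (List (Int × Int)) := ([((0 : Int), (0 : Int))], [((1 : Int), (1 : Int))])

def Spec_is_translation (A : List (Int × Int)) (B : List (Int × Int)) (out : Bool) : Prop := out = is_translation_alt A B
instance (A : List (Int × Int)) (B : List (Int × Int)) (out : Bool) : Decidable (Spec_is_translation A B out) := by unfold Spec_is_translation; infer_instance

-- ===== CLAIM (what is proved, stated in full; the proofs are below) =====
def Claim_equal_is_translation : Prop := ∀ (A : List (Int × Int)) (B : List (Int × Int)), Dom_is_translation A B → Pre_is_translation A B → Spec_is_translation A B (is_translation A B)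

-- ===== LEMMAS AND PROOFS =====

-- the lexicographic key Python's tuple comparison uses
def pvK (p : Int × Int) : Int ×ₗ Int := toLex p

theorem pvK_inj : Function.Injective pvK := fun _ _ h => toLex.injective h

theorem pv_ltb (a b : Int × Int) :
    (decide (a.1 < b.1) || (!decide (b.1 < a.1) && decide (a.2 < b.2))) = decide (pvK a < pvK b) := by
  rw [Bool.eq_iff_iff]
  simp [pvK, Prod.Lex.lt_iff]
  omega

theorem pv_sorted2_eq (xs : List (Int × Int)) :
    PySem.List.sorted2 xs (fun p => p.1) (fun p => p.2) = PySem.List.sorted xs pvK := by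
  rw [PySem.List.sorted_eq_foldl_insertBy]
  simp only [PySem.List.sorted2]
  congr 1
  funext acc x
  congr 1
  funext a b
  exact pv_ltb a b

theorem pv_min2_eq (xs : List (Int × Int)) :
    PySem.List.min2? xs (fun p => p.1) (fun p => p.2) = PySem.List.min? xs pvK := by
  simp only [PySem.List.min2?, PySem.List.min?]
  congr 1
  funext acc x
  cases acc with
  | none => rfl
  | some m =>
    simp only [pv_ltb]
    by_cases h : pvK x < pvK m <;> simp [h]

theorem pv_sorted2_congr {X Y : List (Int × Int)} (h : X.Perm Y) :
    PySem.List.sorted2 X (fun p => p.1) (fun p => p.2)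
      = PySem.List.sorted2 Y (fun p => p.1) (fun p => p.2) := by
  rw [pv_sorted2_eq, pv_sorted2_eq]
  exact PySem.List.eq_of_perm_of_pairwise_le_of_injective pvK pvK_inj
    (((PySem.List.sorted_perm X pvK false).trans h).trans (PySem.List.sorted_perm Y pvK false).symm)
    (PySem.List.sorted_pairwise X pvK) (PySem.List.sorted_pairwise Y pvK)

theorem pv_sorted2_eq_iff_perm (X Y : List (Int × Int)) :
    PySem.List.sorted2 X (fun p => p.1) (fun p => p.2)
      = PySem.List.sorted2 Y (fun p => p.1) (fun p => p.2) ↔ X.Perm Y := by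
  constructor
  · intro h
    exact ((PySem.List.sorted2_perm X _ _ false).symm.trans (h ▸ PySem.List.sorted2_perm Y _ _ false))
  · exact pv_sorted2_congr

-- sorted(X)[0] and min(X) are the same tuple
theorem pv_head_eq_min {X : List (Int × Int)} {x m : Int × Int} {t : List (Int × Int)}
    (h : PySem.List.sorted2 X (fun p => p.1) (fun p => p.2) = x :: t)
    (hm : PySem.List.min2? X (fun p => p.1) (fun p => p.2) = some m) : x = m := by
  rw [pv_sorted2_eq] at h
  rw [pv_min2_eq] at hm
  have hxX : x ∈ X := (PySem.List.sorted_perm X pvK false).mem_iff.mp (h ▸ List.mem_cons_self)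
  have hmX : m ∈ X := PySem.List.min?_mem hm
  exact pvK_inj (le_antisymm (PySem.List.key_head_sorted_le X pvK h m hmX)
    (PySem.List.min?_isMin hm x hxX))

theorem pv_chk_iff (mb : Int × Int) (xs : List (Int × Int)) (d : PySem.Dict (Int × Int) Int)
    (hpos : ∀ q, 0 ≤ d.getD q 0) :
    pvChk mb d xs = true ↔
      ∀ q : Int × Int, ((xs.map (fun p => (p.1 - mb.1, p.2 - mb.2))).count q : Int) ≤ d.getD q 0 := by
  induction xs generalizing d with
  | nil =>
    refine iff_of_true rfl ?_
    intro q
    rw [List.map_nil, List.count_nil]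
    exact_mod_cast hpos q
  | cons p rest ih =>
    simp only [pvChk]
    by_cases h0 : d.getD (p.1 - mb.1, p.2 - mb.2) 0 = 0
    · rw [if_pos (by simp [h0])]
      constructor
      · intro h; exact absurd h (by simp)
      · intro hr
        have := hr (p.1 - mb.1, p.2 - mb.2)
        rw [List.map_cons, List.count_cons_self, h0] at this
        push_cast at this
        omega
    · have hge : 1 ≤ d.getD (p.1 - mb.1, p.2 - mb.2) 0 := by
        have := hpos (p.1 - mb.1, p.2 - mb.2); omega
      rw [if_neg (by simp [h0])]
      rw [ih _ (by
        intro q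
        rw [PySem.Dict.getD_insert]
        split_ifs with hq
        · omega
        · exact hpos q)]
      constructor
      · intro hr q
        have hq := hr q
        rw [PySem.Dict.getD_insert] at hq
        rw [List.map_cons, List.count_cons]
        split_ifs at hq with h
        · subst h; simp only [beq_self_eq_true, if_true]; push_cast; omega
        · have hne : (((p.1 - mb.1, p.2 - mb.2) : Int × Int) == q) = false := by
            simp; exact fun hh => h hh.symm
          simp only [hne, Bool.false_eq_true, if_false]; omega
      · intro hr q
        have hq := hr q
        rw [List.map_cons, List.count_cons] at hq
        rw [PySem.Dict.getD_insert]
        split_ifs with h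
        · subst h; simp only [beq_self_eq_true, if_true] at hq; push_cast at hq; omega
        · have hne : (((p.1 - mb.1, p.2 - mb.2) : Int × Int) == q) = false := by
            simp; exact fun hh => h hh.symm
          simp only [hne, Bool.false_eq_true, if_false] at hq; omega

theorem pv_counts (ma : Int × Int) (A : List (Int × Int)) (q : Int × Int) :
    (A.foldl (fun d p => d.insert (p.1 - ma.1, p.2 - ma.2) (d.getD (p.1 - ma.1, p.2 - ma.2) 0 + 1))
        PySem.Dict.empty).getD q 0
      = ((A.map (fun p => (p.1 - ma.1, p.2 - ma.2))).count q : Int) := by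
  rw [← List.foldl_map (f := fun p : Int × Int => (p.1 - ma.1, p.2 - ma.2))
      (g := fun d x => PySem.Dict.insert d x (d.getD x 0 + 1))]
  rw [PySem.Dict.getD_foldl_insert_add_one]
  simp

-- ===== VERDICT (by name: the statement is the Claim_ definition above) =====
theorem is_translation_spec : Claim_equal_is_translation := by
  unfold Claim_equal_is_translation
  intro A B _ hpre
  unfold Spec_is_translation is_translation is_translation_alt
  by_cases hlen : A.length = B.length
  · simp only [hlen, ne_eq, not_true_eq_false, if_false]
    cases hA : A with
    | nil =>
      exfalso
      apply hpre
      refine ⟨hA, ?_⟩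
      subst hA
      exact List.eq_nil_of_length_eq_zero hlen.symm
    | cons a as =>
      cases hB : B with
      | nil => subst hB hA; simp at hlen
      | cons b bs =>
        subst hA hB
        -- the sorted lists are nonempty
        obtain ⟨x, t, hAs⟩ : ∃ x t, PySem.List.sorted2 (a :: as) (fun p => p.1) (fun p => p.2) = x :: t := by
          cases h : PySem.List.sorted2 (a :: as) (fun p => p.1) (fun p => p.2) with
          | nil => exact absurd (PySem.List.sorted2_perm (a :: as) _ _ false) (by rw [h]; intro hp; simpa using hp.length_eq)
          | cons x t => exact ⟨x, t, rfl⟩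
        obtain ⟨y, u, hBs⟩ : ∃ y u, PySem.List.sorted2 (b :: bs) (fun p => p.1) (fun p => p.2) = y :: u := by
          cases h : PySem.List.sorted2 (b :: bs) (fun p => p.1) (fun p => p.2) with
          | nil => exact absurd (PySem.List.sorted2_perm (b :: bs) _ _ false) (by rw [h]; intro hp; simpa using hp.length_eq)
          | cons y u => exact ⟨y, u, rfl⟩
        obtain ⟨ma, hma⟩ : ∃ ma, PySem.List.min2? (a :: as) (fun p => p.1) (fun p => p.2) = some ma := by
          cases h : PySem.List.min2? (a :: as) (fun p => p.1) (fun p => p.2) with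
          | none => exact absurd ((PySem.List.min?_eq_none_iff _ _).mp (pv_min2_eq _ ▸ h)) (by simp)
          | some m => exact ⟨m, rfl⟩
        obtain ⟨mb, hmb⟩ : ∃ mb, PySem.List.min2? (b :: bs) (fun p => p.1) (fun p => p.2) = some mb := by
          cases h : PySem.List.min2? (b :: bs) (fun p => p.1) (fun p => p.2) with
          | none => exact absurd ((PySem.List.min?_eq_none_iff _ _).mp (pv_min2_eq _ ▸ h)) (by simp)
          | some m => exact ⟨m, rfl⟩
        have hxma : x = ma := pv_head_eq_min hAs hma
        have hymb : y = mb := pv_head_eq_min hBs hmb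
        simp only [hAs, hBs, hma, hmb]
        have hget : ∀ (z : Int × Int) (l : List (Int × Int)), PySem.List.pyGet? (z :: l) 0 = some z := by
          intro z l; simp [PySem.List.pyGet?, PySem.List.pyIdx?]
        rw [hget, hget]
        subst hxma hymb
        rw [Bool.eq_iff_iff]
        -- A side ↔ the shifted multiset equation
        have hAside :
            (decide (PySem.List.sorted2 ((x :: t).map (fun p => (p.1 + (y.1 - x.1), p.2 + (y.2 - x.2)))) (fun p => p.1) (fun p => p.2) = y :: u) = true)
              ↔ ((a :: as).map (fun p => (p.1 + (y.1 - x.1), p.2 + (y.2 - x.2)))).Perm (b :: bs) := by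
          rw [decide_eq_true_iff, ← hBs]
          rw [pv_sorted2_congr ((hAs ▸ PySem.List.sorted2_perm (a :: as) (fun p => p.1) (fun p => p.2) false).map _)]
          exact pv_sorted2_eq_iff_perm _ _
        rw [hAside]
        -- B side ↔ countwise domination of the normalised lists
        rw [pv_chk_iff _ _ _ (by intro q; rw [pv_counts]; positivity)]
        have hcnt :
            (∀ q : Int × Int, (((b :: bs).map (fun p => (p.1 - y.1, p.2 - y.2))).count q : Int)
                ≤ ((a :: as).foldl (fun d p => d.insert (p.1 - x.1, p.2 - x.2) (d.getD (p.1 - x.1, p.2 - x.2) 0 + 1)) PySem.Dict.empty).getD q 0)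
              ↔ ((b :: bs).map (fun p => (p.1 - y.1, p.2 - y.2))).Subperm ((a :: as).map (fun p => (p.1 - x.1, p.2 - x.2))) := by
          rw [List.subperm_ext_iff]
          constructor
          · intro h q _
            have := h q
            rw [pv_counts] at this
            exact_mod_cast this
          · intro h q
            rw [pv_counts]
            by_cases hq : q ∈ (b :: bs).map (fun p => (p.1 - y.1, p.2 - y.2))
            · exact_mod_cast h q hq
            · rw [List.count_eq_zero_of_not_mem hq]; positivity
        rw [hcnt]
        -- close the circle: shifted-A ~ B  ↔  normalised-B ⊆ normalised-A (with equal lengths)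
        constructor
        · intro h
          have hn : ((a :: as).map (fun p => (p.1 - x.1, p.2 - x.2))).Perm ((b :: bs).map (fun p => (p.1 - y.1, p.2 - y.2))) := by
            have := h.map (fun p : Int × Int => (p.1 - y.1, p.2 - y.2))
            simpa [Function.comp, sub_eq_iff_eq_add] using
              (by
                have h2 := h.map (fun p : Int × Int => (p.1 - y.1, p.2 - y.2))
                rw [List.map_map] at h2
                have : ((fun p : Int × Int => (p.1 - y.1, p.2 - y.2)) ∘ (fun p : Int × Int => (p.1 + (y.1 - x.1), p.2 + (y.2 - x.2))))
                    = (fun p : Int × Int => (p.1 - x.1, p.2 - x.2)) := by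
                  funext p; simp [Function.comp]; constructor <;> ring
                rwa [this] at h2)
          exact hn.symm.subperm
        · intro h
          have hlen2 : ((a :: as).map (fun p => (p.1 - x.1, p.2 - x.2))).length
              ≤ ((b :: bs).map (fun p => (p.1 - y.1, p.2 - y.2))).length := by
            simp only [List.length_map, List.length_cons] at hlen ⊢
            omega
          have hn := (h.perm_of_length_le (by simpa using hlen2)).symm
          have h2 := hn.map (fun p : Int × Int => (p.1 + y.1, p.2 + y.2))
          rw [List.map_map, List.map_map] at h2
          have e1 : ((fun p : Int × Int => (p.1 + y.1, p.2 + y.2)) ∘ (fun p : Int × Int => (p.1 - x.1, p.2 - x.2)))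
              = (fun p : Int × Int => (p.1 + (y.1 - x.1), p.2 + (y.2 - x.2))) := by
            funext p; simp [Function.comp]; constructor <;> ring
          have e2 : ((fun p : Int × Int => (p.1 + y.1, p.2 + y.2)) ∘ (fun p : Int × Int => (p.1 - y.1, p.2 - y.2)))
              = (fun p : Int × Int => p) := by
            funext p; simp [Function.comp]
          rw [e1, e2, List.map_id'] at h2
          exact h2
  · simp [hlen]
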